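-- pv_equiv track=rewrite | github.com/kraigboates/AoC-2020 | day6.py | part2
-- ===== SOURCE A (Python) =====
-- def part2(input):
--     group = set()
--     initial = True
--     claims_total = 0
--     for line in input:
--         line = line.strip()
--         if not line: # the line is empty
--             claims_total += len(group)
--             group = set()
--             initial = True
--         else:
--             if initial:
--                 for char in line:
--                     group.add(char)
--                 initial = False
--             else:
--                 test = set()
--                 for char in line:
--                     test.add(char)
--                 group = group & test
--
--     return claims_total
-- ===== SOURCE B (Python) =====
-- def part2(input):
--     # Pass 1: partition into blank-terminated groups of stripped lines
--     # (the trailing group, not closed by a blank line, is dropped, as in A).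
--     groups = []
--     cur = []
--     for line in input:
--         s = line.strip()
--         if s:
--             cur.append(s)
--         else:
--             groups.append(cur)
--             cur = []
--     # Pass 2: each group contributes the size of the intersection of its lines' char sets.
--     return sum(len(set.intersection(*[set(l) for l in g])) if g else 0 for g in groups)
-- ===== Notes on version B (the rewrite author's own statement) =====
-- stated objective: alternative
-- what changed: B separates grouping from counting: one pass partitions the lines into blank-terminated groups, a second pass maps each group to the size of the intersection of its lines' character sets and sums, removing A's running set and 'initial' flag.
import Mathlib
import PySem

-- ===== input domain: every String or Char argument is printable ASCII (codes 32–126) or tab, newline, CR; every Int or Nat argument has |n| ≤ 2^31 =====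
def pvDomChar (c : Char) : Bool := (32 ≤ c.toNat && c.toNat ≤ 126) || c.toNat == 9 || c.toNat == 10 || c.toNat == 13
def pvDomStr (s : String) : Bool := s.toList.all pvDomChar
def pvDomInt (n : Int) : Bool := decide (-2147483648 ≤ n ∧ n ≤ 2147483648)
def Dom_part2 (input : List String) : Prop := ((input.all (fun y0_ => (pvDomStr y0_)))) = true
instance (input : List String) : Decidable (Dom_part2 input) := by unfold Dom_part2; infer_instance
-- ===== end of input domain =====

-- B separates grouping from counting (two passes); same value as A on all inputs.

-- ===== PORT A =====
-- one iteration of A's loop over (group, initial, claims_total)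
def part2StepA (st : PySem.Set Char × Bool × Int) (line : String) :
    PySem.Set Char × Bool × Int :=
  let line := PySem.Str.strip line
  if line = "" then
    (PySem.Set.empty, true, st.2.2 + (st.1.length : Int))
  else
    if st.2.1 then
      (line.toList.foldl (fun g c => PySem.Set.add g c) st.1, false, st.2.2)
    else
      let test := line.toList.foldl (fun t c => PySem.Set.add t c) PySem.Set.empty
      (PySem.Set.inter st.1 test, false, st.2.2)

def part2 (input : List String) : Int :=
  (input.foldl part2StepA (PySem.Set.empty, true, 0)).2.2

-- ===== PORT B =====
-- pass 1 step: accumulate (finished groups, current group)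
def part2StepB (p : List (List String) × List String) (line : String) :
    List (List String) × List String :=
  let s := PySem.Str.strip line
  if s = "" then (p.1 ++ [p.2], []) else (p.1, p.2 ++ [s])

def part2Groups (input : List String) : List (List String) :=
  (input.foldl part2StepB ([], [])).1

-- pass 2: size of the intersection of the lines' char sets (0 for an empty group)
def part2Count (g : List String) : Int :=
  match g with
  | [] => 0
  | h :: t =>
    (((t.map (fun l => PySem.Set.ofList l.toList)).foldl PySem.Set.inter
        (PySem.Set.ofList h.toList)).length : Int)

def part2_alt (input : List String) : Int :=
  ((part2Groups input).map part2Count).sum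

-- ===== PRECONDITION & SPEC =====
def Spec_part2 (input : List String) (out : Int) : Prop := out = part2_alt input
instance (input : List String) (out : Int) : Decidable (Spec_part2 input out) := by unfold Spec_part2; infer_instance

-- ===== CLAIM (what is proved, stated in full; the proofs are below) =====
def Claim_equal_part2 : Prop := ∀ (input : List String), Dom_part2 input → Spec_part2 input (part2 input)

-- ===== LEMMAS AND PROOFS =====

-- the set A's running state holds for a current group of (stripped, nonempty) lines
def pvCurSet (cur : List String) : PySem.Set Char :=
  match cur with
  | [] => PySem.Set.empty
  | h :: t => (t.map (fun l => PySem.Set.ofList l.toList)).foldl PySem.Set.inter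
      (PySem.Set.ofList h.toList)

-- B's grouping, written recursively
def pvGroups : List String → List String → List (List String)
  | [], _ => []
  | l :: rest, cur =>
    let s := PySem.Str.strip l
    if s = "" then cur :: pvGroups rest [] else pvGroups rest (cur ++ [s])

lemma pvCount_curSet (g : List String) : part2Count g = ((pvCurSet g).length : Int) := by
  cases g <;> simp [part2Count, pvCurSet, PySem.Set.empty]

lemma pvCurSet_append (cur : List String) (s : String) :
    pvCurSet (cur ++ [s]) =
      (if cur.isEmpty then
        s.toList.foldl (fun g c => PySem.Set.add g c) (pvCurSet cur)
      else
        PySem.Set.inter (pvCurSet cur)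
          (s.toList.foldl (fun t c => PySem.Set.add t c) PySem.Set.empty)) := by
  cases cur with
  | nil => simp [pvCurSet, PySem.Set.ofList_eq_foldl, PySem.Set.empty]
  | cons h t => simp [pvCurSet, List.foldl_append, PySem.Set.ofList_eq_foldl, PySem.Set.empty]

lemma pvFoldA (input : List String) : ∀ (cur : List String) (t : Int),
    (input.foldl part2StepA (pvCurSet cur, cur.isEmpty, t)).2.2
      = t + ((pvGroups input cur).map part2Count).sum := by
  induction input with
  | nil => intro cur t; simp [pvGroups]
  | cons l rest ih =>
    intro cur t
    simp only [List.foldl_cons, pvGroups]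
    by_cases h : PySem.Str.strip l = ""
    · have : part2StepA (pvCurSet cur, cur.isEmpty, t) l
          = (pvCurSet [], (List.isEmpty ([] : List String)), t + part2Count cur) := by
        simp [part2StepA, h, pvCurSet, pvCount_curSet]
      rw [this, ih [] (t + part2Count cur)]
      simp [h]
      ring
    · have : part2StepA (pvCurSet cur, cur.isEmpty, t) l
          = (pvCurSet (cur ++ [PySem.Str.strip l]),
             (cur ++ [PySem.Str.strip l]).isEmpty, t) := by
        rw [pvCurSet_append]
        cases cur <;> simp [part2StepA, h]
      rw [this, ih (cur ++ [PySem.Str.strip l]) t]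
      simp [h]

lemma pvFoldB (input : List String) : ∀ (gs : List (List String)) (cur : List String),
    (input.foldl part2StepB (gs, cur)).1 = gs ++ pvGroups input cur := by
  induction input with
  | nil => intro gs cur; simp [pvGroups]
  | cons l rest ih =>
    intro gs cur
    simp only [List.foldl_cons, pvGroups, part2StepB]
    by_cases h : PySem.Str.strip l = ""
    · simp [h, ih]
    · simp [h, ih]

-- ===== VERDICT (by name: the statement is the Claim_ definition above) =====
theorem part2_spec : Claim_equal_part2 := by
  intro input _
  unfold Spec_part2 part2 part2_alt part2Groups
  have hA := pvFoldA input [] 0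
  have hB := pvFoldB input [] []
  simp only [pvCurSet, List.isEmpty_nil] at hA
  rw [hA, hB]
  simp
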